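-- pv_equiv track=rewrite | github.com/ynitto/sandbox | .github/skills/presentator/sdpm/layout/grid.py | _map_areas
-- ===== SOURCE A (Python) =====
-- def _map_areas(
--     areas: list[list[str]],
--     col_pos: list[int],
--     col_sizes: list[int],
--     row_pos: list[int],
--     row_sizes: list[int],
--     col_gap: int = 0,
--     row_gap: int = 0,
-- ) -> dict:
--     """Map grid-template-areas to merged rectangles."""
--     bounds: dict[str, dict] = {}
--     for r, row in enumerate(areas):
--         for c, name in enumerate(row):
--             if name not in bounds:
--                 bounds[name] = {"r0": r, "r1": r, "c0": c, "c1": c}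
--             else:
--                 b = bounds[name]
--                 b["r0"] = min(b["r0"], r)
--                 b["r1"] = max(b["r1"], r)
--                 b["c0"] = min(b["c0"], c)
--                 b["c1"] = max(b["c1"], c)
--
--     result = {}
--     for name, b in bounds.items():
--         x = col_pos[b["c0"]]
--         y = row_pos[b["r0"]]
--         w = col_pos[b["c1"]] + col_sizes[b["c1"]] - x
--         h = row_pos[b["r1"]] + row_sizes[b["r1"]] - y
--         rect = _make_rect(x, y, w, h)
--         if b["c1"] < len(col_sizes) - 1 and col_gap > 0:
--             rect["gx2"] = rect["x2"] + col_gap // 2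
--         if b["r1"] < len(row_sizes) - 1 and row_gap > 0:
--             rect["gy2"] = rect["y2"] + row_gap // 2
--         result[name] = rect
--
--     return result
--
-- def _make_rect(x: int, y: int, w: int, h: int) -> dict:
--     """Create rectangle dict with bb coordinates."""
--     return {
--         "x": x, "y": y, "w": w, "h": h,
--         "x2": x + w, "y2": y + h,
--         "cx": x + w // 2, "cy": y + h // 2,
--     }
-- ===== SOURCE B (Python) =====
-- def _map_areas(
--     areas: list[list[str]],
--     col_pos: list[int],
--     col_sizes: list[int],
--     row_pos: list[int],
--     row_sizes: list[int],
--     col_gap: int = 0,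
--     row_gap: int = 0,
-- ) -> dict:
--     """Map grid-template-areas to merged rectangles (per-name rescan)."""
--     # First-occurrence order of area names.
--     names: list[str] = []
--     for row in areas:
--         for name in row:
--             if name not in names:
--                 names.append(name)
--
--     result = {}
--     for name in names:
--         rs = [r for r, row in enumerate(areas) for n in row if n == name]
--         cs = [c for row in areas for c, n in enumerate(row) if n == name]
--         r0, r1 = min(rs), max(rs)
--         c0, c1 = min(cs), max(cs)
--         x = col_pos[c0]
--         y = row_pos[r0]
--         w = col_pos[c1] + col_sizes[c1] - x
--         h = row_pos[r1] + row_sizes[r1] - y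
--         x2, y2 = x + w, y + h
--         rect = [("x", x), ("y", y), ("w", w), ("h", h),
--                 ("x2", x2), ("y2", y2),
--                 ("cx", x + w // 2), ("cy", y + h // 2)]
--         if c1 < len(col_sizes) - 1 and col_gap > 0:
--             rect.append(("gx2", x2 + col_gap // 2))
--         if r1 < len(row_sizes) - 1 and row_gap > 0:
--             rect.append(("gy2", y2 + row_gap // 2))
--         result[name] = dict(rect)
--     return result
-- ===== Notes on version B (the rewrite author's own statement) =====
-- stated objective: alternative
-- what changed: A maintains online min/max bounds per area name in a single grid pass; B first collects the distinct names in first-occurrence order and then, for each name, re-scans the grid with comprehensions gathering its row and column indices and reduces them with min/max, assembling each rectangle as a flat key-value list passed to dict().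
import Mathlib
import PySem

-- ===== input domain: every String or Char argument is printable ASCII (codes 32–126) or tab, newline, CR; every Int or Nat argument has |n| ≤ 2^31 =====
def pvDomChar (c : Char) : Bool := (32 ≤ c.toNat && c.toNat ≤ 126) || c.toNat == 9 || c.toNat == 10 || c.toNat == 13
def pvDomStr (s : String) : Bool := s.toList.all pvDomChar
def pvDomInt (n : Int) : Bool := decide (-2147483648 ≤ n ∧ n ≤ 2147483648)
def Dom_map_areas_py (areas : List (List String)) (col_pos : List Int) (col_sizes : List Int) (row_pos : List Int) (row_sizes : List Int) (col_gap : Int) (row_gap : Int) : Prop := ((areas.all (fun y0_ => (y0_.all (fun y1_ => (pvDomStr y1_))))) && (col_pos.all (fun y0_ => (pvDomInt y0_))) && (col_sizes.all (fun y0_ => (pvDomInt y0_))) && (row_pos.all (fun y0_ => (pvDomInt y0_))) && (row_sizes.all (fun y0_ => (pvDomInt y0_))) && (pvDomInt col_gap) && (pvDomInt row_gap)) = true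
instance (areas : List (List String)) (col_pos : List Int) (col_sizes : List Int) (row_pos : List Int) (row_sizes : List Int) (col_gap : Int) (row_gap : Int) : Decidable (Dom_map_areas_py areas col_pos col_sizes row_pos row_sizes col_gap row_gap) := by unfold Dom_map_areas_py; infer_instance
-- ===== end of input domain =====

-- B replaces A's online min/max bookkeeping by a two-stage plan: collect first-occurrence name order, then re-scan the grid per name with comprehensions and reduce with min/max; objective: alternative decomposition, same output.


-- ===== PORT A =====
-- A's helper _make_rect
def pvMakeRect (x y w h : Int) : PySem.Dict String Int :=
  PySem.Dict.ofList [("x", x), ("y", y), ("w", w), ("h", h),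
    ("x2", x + w), ("y2", y + h),
    ("cx", x + PySem.Int.floordiv w 2), ("cy", y + PySem.Int.floordiv h 2)]

-- inner-loop body: one grid cell updates the online bounds
def pvCellA (r : Int) (d : PySem.Dict String (Int × Int × Int × Int)) (cn : Int × String) :
    PySem.Dict String (Int × Int × Int × Int) :=
  if d.contains cn.2 = false then
    d.insert cn.2 (r, r, cn.1, cn.1)
  else
    d.modify cn.2 (0, 0, 0, 0) (fun b =>
      (min b.1 r, max b.2.1 r, min b.2.2.1 cn.1, max b.2.2.2 cn.1))

def pvRowA (d : PySem.Dict String (Int × Int × Int × Int)) (rr : Int × List String) :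
    PySem.Dict String (Int × Int × Int × Int) :=
  (PySem.List.enumerate rr.2).foldl (pvCellA rr.1) d

-- result-loop body for one (name, bounds) item  (pyGetD: index in range under Pre_)
def pvRectA (col_pos col_sizes row_pos row_sizes : List Int) (col_gap row_gap : Int)
    (res : PySem.Dict String (PySem.Dict String Int)) (nb : String × (Int × Int × Int × Int)) :
    PySem.Dict String (PySem.Dict String Int) :=
  let x := PySem.List.pyGetD col_pos nb.2.2.2.1 0
  let y := PySem.List.pyGetD row_pos nb.2.1 0
  let w := PySem.List.pyGetD col_pos nb.2.2.2.2 0 + PySem.List.pyGetD col_sizes nb.2.2.2.2 0 - x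
  let h := PySem.List.pyGetD row_pos nb.2.2.1 0 + PySem.List.pyGetD row_sizes nb.2.2.1 0 - y
  let rect := pvMakeRect x y w h
  let rect := if nb.2.2.2.2 < (col_sizes.length : Int) - 1 ∧ col_gap > 0 then
      rect.insert "gx2" (rect.getD "x2" 0 + PySem.Int.floordiv col_gap 2) else rect
  let rect := if nb.2.2.1 < (row_sizes.length : Int) - 1 ∧ row_gap > 0 then
      rect.insert "gy2" (rect.getD "y2" 0 + PySem.Int.floordiv row_gap 2) else rect
  res.insert nb.1 rect

def map_areas_py (areas : List (List String)) (col_pos : List Int) (col_sizes : List Int) (row_pos : List Int) (row_sizes : List Int) (col_gap : Int) (row_gap : Int) : List (String × List (String × Int)) :=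
  ((((PySem.List.enumerate areas).foldl pvRowA PySem.Dict.empty).items.foldl
      (pvRectA col_pos col_sizes row_pos row_sizes col_gap row_gap) PySem.Dict.empty).items).map
    (fun p => (p.1, p.2.items))

-- ===== PORT B =====
-- names.append(name) unless already collected (first-occurrence order)
def pvAddName (ns : List String) (n : String) : List String :=
  if ns.contains n then ns else ns ++ [n]

def pvNames (areas : List (List String)) : List String :=
  areas.foldl (fun ns row => row.foldl pvAddName ns) []

-- rs = [r for r, row in enumerate(areas) for n in row if n == name]
def pvRowsOf (areas : List (List String)) (name : String) : List Int :=
  (PySem.List.enumerate areas).flatMap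
    (fun rr => rr.2.filterMap (fun n => if n == name then some rr.1 else none))

-- cs = [c for row in areas for c, n in enumerate(row) if n == name]
def pvColsOf (areas : List (List String)) (name : String) : List Int :=
  areas.flatMap
    (fun row => (PySem.List.enumerate row).filterMap (fun cn => if cn.2 == name then some cn.1 else none))

-- per-name reduction: min/max over the gathered indices, rect assembled as a flat pair list
def pvRectFor (col_pos col_sizes row_pos row_sizes : List Int) (col_gap row_gap : Int)
    (areas : List (List String)) (name : String) : PySem.Dict String Int :=
  let rs := pvRowsOf areas name
  let cs := pvColsOf areas name
  let r0 := PySem.List.minD rs id 0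
  let r1 := PySem.List.maxD rs id 0
  let c0 := PySem.List.minD cs id 0
  let c1 := PySem.List.maxD cs id 0
  let x := PySem.List.pyGetD col_pos c0 0
  let y := PySem.List.pyGetD row_pos r0 0
  let w := PySem.List.pyGetD col_pos c1 0 + PySem.List.pyGetD col_sizes c1 0 - x
  let h := PySem.List.pyGetD row_pos r1 0 + PySem.List.pyGetD row_sizes r1 0 - y
  let x2 := x + w
  let y2 := y + h
  let rect : List (String × Int) := [("x", x), ("y", y), ("w", w), ("h", h),
      ("x2", x2), ("y2", y2),
      ("cx", x + PySem.Int.floordiv w 2), ("cy", y + PySem.Int.floordiv h 2)]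
  let rect := if c1 < (col_sizes.length : Int) - 1 ∧ col_gap > 0 then
      rect ++ [("gx2", x2 + PySem.Int.floordiv col_gap 2)] else rect
  let rect := if r1 < (row_sizes.length : Int) - 1 ∧ row_gap > 0 then
      rect ++ [("gy2", y2 + PySem.Int.floordiv row_gap 2)] else rect
  PySem.Dict.ofList rect

def map_areas_py_alt (areas : List (List String)) (col_pos : List Int) (col_sizes : List Int) (row_pos : List Int) (row_sizes : List Int) (col_gap : Int) (row_gap : Int) : List (String × List (String × Int)) :=
  (((pvNames areas).foldl
      (fun res nm => res.insert nm (pvRectFor col_pos col_sizes row_pos row_sizes col_gap row_gap areas nm))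
      PySem.Dict.empty).items).map
    (fun p => (p.1, p.2.items))

-- ===== PRECONDITION & SPEC =====
-- Pre_ excludes exactly the inputs on which the Python A raises IndexError: a row with cells whose
-- row index is beyond row_pos/row_sizes, or a row longer than col_pos/col_sizes.
def Pre_map_areas_py (areas : List (List String)) (col_pos : List Int) (col_sizes : List Int) (row_pos : List Int) (row_sizes : List Int) (col_gap : Int) (row_gap : Int) : Prop :=
  ∀ p ∈ areas.zipIdx, p.1 ≠ [] →
    p.2 < row_pos.length ∧ p.2 < row_sizes.length ∧
    p.1.length ≤ col_pos.length ∧ p.1.length ≤ col_sizes.length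
instance (areas : List (List String)) (col_pos : List Int) (col_sizes : List Int) (row_pos : List Int) (row_sizes : List Int) (col_gap : Int) (row_gap : Int) : Decidable (Pre_map_areas_py areas col_pos col_sizes row_pos row_sizes col_gap row_gap) := by unfold Pre_map_areas_py; infer_instance

def pvWitness_map_areas_py : List (List String) × List Int × List Int × List Int × List Int × Int × Int :=
  ([["a", "a"], ["a", "b"]], [0, 10], [10, 10], [0, 5], [5, 5], 2, 2)

def Spec_map_areas_py (areas : List (List String)) (col_pos : List Int) (col_sizes : List Int) (row_pos : List Int) (row_sizes : List Int) (col_gap : Int) (row_gap : Int) (out : List (String × List (String × Int))) : Prop := out = map_areas_py_alt areas col_pos col_sizes row_pos row_sizes col_gap row_gap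
instance (areas : List (List String)) (col_pos : List Int) (col_sizes : List Int) (row_pos : List Int) (row_sizes : List Int) (col_gap : Int) (row_gap : Int) (out : List (String × List (String × Int))) : Decidable (Spec_map_areas_py areas col_pos col_sizes row_pos row_sizes col_gap row_gap out) := by unfold Spec_map_areas_py; infer_instance

-- ===== CLAIM (what is proved, stated in full; the proofs are below) =====
def Claim_equal_map_areas_py : Prop := ∀ (areas : List (List String)) (col_pos : List Int) (col_sizes : List Int) (row_pos : List Int) (row_sizes : List Int) (col_gap : Int) (row_gap : Int), Dom_map_areas_py areas col_pos col_sizes row_pos row_sizes col_gap row_gap → Pre_map_areas_py areas col_pos col_sizes row_pos row_sizes col_gap row_gap → Spec_map_areas_py areas col_pos col_sizes row_pos row_sizes col_gap row_gap (map_areas_py areas col_pos col_sizes row_pos row_sizes col_gap row_gap)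

-- ===== LEMMAS AND PROOFS =====

-- the grid flattened into a single cell stream (r, c, name); proofs relate both ports to it
def pvCellsFrom (areas : List (List String)) (s : Int) : List (Int × Int × String) :=
  (PySem.List.enumerate areas s).flatMap
    (fun rr => (PySem.List.enumerate rr.2).map (fun cn => (rr.1, cn.1, cn.2)))

def pvStep1 (d : PySem.Dict String (Int × Int × Int × Int)) (t : Int × Int × String) :
    PySem.Dict String (Int × Int × Int × Int) :=
  pvCellA t.1 d (t.2.1, t.2.2)

def pvNStep (ns : List String) (t : Int × Int × String) : List String := pvAddName ns t.2.2

def pvRs (M : List (Int × Int × String)) (nm : String) : List Int :=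
  M.filterMap (fun t => if t.2.2 == nm then some t.1 else none)
def pvCs (M : List (Int × Int × String)) (nm : String) : List Int :=
  M.filterMap (fun t => if t.2.2 == nm then some t.2.1 else none)
def pvBnd (M : List (Int × Int × String)) (nm : String) : Int × Int × Int × Int :=
  (PySem.List.minD (pvRs M nm) id 0, PySem.List.maxD (pvRs M nm) id 0,
   PySem.List.minD (pvCs M nm) id 0, PySem.List.maxD (pvCs M nm) id 0)

-- A's phase-2 body, value part
def pvRectAVal (col_pos col_sizes row_pos row_sizes : List Int) (col_gap row_gap : Int)
    (nb : String × (Int × Int × Int × Int)) : PySem.Dict String Int :=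
  let x := PySem.List.pyGetD col_pos nb.2.2.2.1 0
  let y := PySem.List.pyGetD row_pos nb.2.1 0
  let w := PySem.List.pyGetD col_pos nb.2.2.2.2 0 + PySem.List.pyGetD col_sizes nb.2.2.2.2 0 - x
  let h := PySem.List.pyGetD row_pos nb.2.2.1 0 + PySem.List.pyGetD row_sizes nb.2.2.1 0 - y
  let rect := pvMakeRect x y w h
  let rect := if nb.2.2.2.2 < (col_sizes.length : Int) - 1 ∧ col_gap > 0 then
      rect.insert "gx2" (rect.getD "x2" 0 + PySem.Int.floordiv col_gap 2) else rect
  if nb.2.2.1 < (row_sizes.length : Int) - 1 ∧ row_gap > 0 then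
      rect.insert "gy2" (rect.getD "y2" 0 + PySem.Int.floordiv row_gap 2) else rect

theorem pvMinD_append (l : List Int) (x : Int) (h : l ≠ []) :
    PySem.List.minD (l ++ [x]) id 0 = min (PySem.List.minD l id 0) x := by
  cases hm : PySem.List.min? l id with
  | none => exact absurd ((PySem.List.min?_eq_none_iff l id).mp hm) h
  | some m =>
    have h2 : PySem.List.min? (l ++ [x]) id = some (if x < m then x else m) := by
      unfold PySem.List.min? at hm ⊢
      rw [List.foldl_append, hm]
      show (if id x < id m then some x else some m) = some (if x < m then x else m)
      by_cases hxm : x < m <;> simp [hxm]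
    simp only [PySem.List.minD, h2, hm, Option.getD_some]
    by_cases hlt : x < m
    · rw [if_pos hlt, min_eq_right hlt.le]
    · rw [if_neg hlt, min_eq_left (not_lt.mp hlt)]

theorem pvMaxD_append (l : List Int) (x : Int) (h : l ≠ []) :
    PySem.List.maxD (l ++ [x]) id 0 = max (PySem.List.maxD l id 0) x := by
  cases hm : PySem.List.max? l id with
  | none => exact absurd ((PySem.List.max?_eq_none_iff l id).mp hm) h
  | some m =>
    have h2 : PySem.List.max? (l ++ [x]) id = some (if m < x then x else m) := by
      unfold PySem.List.max? at hm ⊢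
      rw [List.foldl_append, hm]
      show (if id m < id x then some x else some m) = some (if m < x then x else m)
      by_cases hxm : m < x <;> simp [hxm]
    simp only [PySem.List.maxD, h2, hm, Option.getD_some]
    by_cases hlt : m < x
    · rw [if_pos hlt, max_eq_right hlt.le]
    · rw [if_neg hlt, max_eq_left (not_lt.mp hlt)]

theorem pvCellsFrom_cons (a : List String) (as : List (List String)) (s : Int) :
    pvCellsFrom (a :: as) s
      = (PySem.List.enumerate a).map (fun cn => (s, cn.1, cn.2)) ++ pvCellsFrom as (s + 1) := by
  simp [pvCellsFrom, PySem.List.enumerate_cons]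

-- A's nested enumerate loops = one fold over the flattened cell stream
theorem pvFlatA (areas : List (List String)) : ∀ (s : Int) (d : PySem.Dict String (Int × Int × Int × Int)),
    (PySem.List.enumerate areas s).foldl pvRowA d = (pvCellsFrom areas s).foldl pvStep1 d := by
  induction areas with
  | nil => intro s d; simp [pvCellsFrom, PySem.List.enumerate_nil]
  | cons a as ih =>
    intro s d
    rw [PySem.List.enumerate_cons, List.foldl_cons, pvCellsFrom_cons, List.foldl_append,
        List.foldl_map]
    have hrow : pvRowA d (s, a)
        = (PySem.List.enumerate a).foldl (fun d cn => pvStep1 d (s, cn.1, cn.2)) d := rfl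
    rw [hrow]
    exact ih (s + 1) _

-- B's name collection = one fold over the flattened cell stream
theorem pvRowNames (row : List String) : ∀ (s0 : Int) (ns : List String),
    (PySem.List.enumerate row s0).foldl (fun ns cn => pvAddName ns cn.2) ns
      = row.foldl pvAddName ns := by
  induction row with
  | nil => intro s0 ns; simp [PySem.List.enumerate_nil]
  | cons a as ih => intro s0 ns; rw [PySem.List.enumerate_cons, List.foldl_cons]; exact ih _ _

theorem pvFlatNames (areas : List (List String)) : ∀ (s : Int) (ns : List String),
    areas.foldl (fun ns row => row.foldl pvAddName ns) ns
      = (pvCellsFrom areas s).foldl pvNStep ns := by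
  induction areas with
  | nil => intro s ns; simp [pvCellsFrom, PySem.List.enumerate_nil]
  | cons a as ih =>
    intro s ns
    rw [List.foldl_cons, pvCellsFrom_cons, List.foldl_append, List.foldl_map]
    have : (PySem.List.enumerate a).foldl (fun ns cn => pvNStep ns (s, cn.1, cn.2)) ns
        = a.foldl pvAddName ns := pvRowNames a 0 ns
    rw [this]
    exact ih (s + 1) _

-- filterMap of an enumerate that only looks at the element = filterMap of the row
theorem pvEnumFilter {α : Type} (row : List String) (s0 : Int) (g : String → Option α) :
    (PySem.List.enumerate row s0).filterMap (fun cn => g cn.2) = row.filterMap g := by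
  conv_rhs => rw [← PySem.List.map_snd_enumerate row s0]
  rw [List.filterMap_map]
  rfl

-- B's row-index comprehension = filter of the flattened cell stream
theorem pvFlatRs (areas : List (List String)) (nm : String) : ∀ (s : Int),
    (PySem.List.enumerate areas s).flatMap
        (fun rr => rr.2.filterMap (fun n => if n == nm then some rr.1 else none))
      = pvRs (pvCellsFrom areas s) nm := by
  induction areas with
  | nil => intro s; simp [pvRs, pvCellsFrom, PySem.List.enumerate_nil]
  | cons a as ih =>
    intro s
    rw [PySem.List.enumerate_cons, List.flatMap_cons, pvRs, pvCellsFrom_cons,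
        List.filterMap_append, List.filterMap_map]
    congr 1
    · exact (pvEnumFilter a 0 (fun n => if n == nm then some s else none)).symm
    · exact ih (s + 1)

theorem pvRowsOf_eq (areas : List (List String)) (nm : String) :
    pvRowsOf areas nm = pvRs (pvCellsFrom areas 0) nm := pvFlatRs areas nm 0

-- B's col-index comprehension = filter of the flattened cell stream
theorem pvFlatCs (areas : List (List String)) (nm : String) : ∀ (s : Int),
    areas.flatMap
        (fun row => (PySem.List.enumerate row).filterMap (fun cn => if cn.2 == nm then some cn.1 else none))
      = pvCs (pvCellsFrom areas s) nm := by
  induction areas with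
  | nil => intro s; simp [pvCs, pvCellsFrom, PySem.List.enumerate_nil]
  | cons a as ih =>
    intro s
    rw [List.flatMap_cons, pvCs, pvCellsFrom_cons, List.filterMap_append, List.filterMap_map]
    congr 1
    exact ih (s + 1)

theorem pvColsOf_eq (areas : List (List String)) (nm : String) :
    pvColsOf areas nm = pvCs (pvCellsFrom areas 0) nm := pvFlatCs areas nm 0

theorem pvAddName_mem (ns : List String) (n : String) (h : n ∈ ns) : pvAddName ns n = ns := by
  unfold pvAddName; rw [if_pos (List.contains_iff_mem.mpr h)]

theorem pvAddName_not_mem (ns : List String) (n : String) (h : n ∉ ns) :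
    pvAddName ns n = ns ++ [n] := by
  unfold pvAddName; rw [if_neg (fun hc => h (List.contains_iff_mem.mp hc))]

theorem pvCellA_contains (r : Int) (d : PySem.Dict String (Int × Int × Int × Int))
    (cn : Int × String) (h : d.contains cn.2 = true) :
    pvCellA r d cn = d.insert cn.2
      (min (d.getD cn.2 (0, 0, 0, 0)).1 r, max (d.getD cn.2 (0, 0, 0, 0)).2.1 r,
       min (d.getD cn.2 (0, 0, 0, 0)).2.2.1 cn.1, max (d.getD cn.2 (0, 0, 0, 0)).2.2.2 cn.1) := by
  unfold pvCellA PySem.Dict.modify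
  rw [h]
  simp

theorem pvCellA_not_contains (r : Int) (d : PySem.Dict String (Int × Int × Int × Int))
    (cn : Int × String) (h : d.contains cn.2 = false) :
    pvCellA r d cn = d.insert cn.2 (r, r, cn.1, cn.1) := by
  unfold pvCellA
  rw [h]
  simp

theorem pvMem_foldl_names (M : List (Int × Int × String)) : ∀ (ns : List String) (x : String),
    x ∈ M.foldl pvNStep ns ↔ x ∈ ns ∨ x ∈ M.map (fun t => t.2.2) := by
  induction M with
  | nil => intro ns x; simp
  | cons t M ih =>
    intro ns x
    rw [List.foldl_cons, ih]
    by_cases h : t.2.2 ∈ ns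
    · rw [show pvNStep ns t = ns from pvAddName_mem ns t.2.2 h]
      simp only [List.map_cons, List.mem_cons]
      constructor
      · rintro (hx | hx)
        · exact Or.inl hx
        · exact Or.inr (Or.inr hx)
      · rintro (hx | hx | hx)
        · exact Or.inl hx
        · exact Or.inl (hx ▸ h)
        · exact Or.inr hx
    · rw [show pvNStep ns t = ns ++ [t.2.2] from pvAddName_not_mem ns t.2.2 h]
      simp only [List.mem_append, List.map_cons, List.mem_cons]
      tauto

theorem pvNodup_foldl_names (M : List (Int × Int × String)) : ∀ (ns : List String),
    ns.Nodup → (M.foldl pvNStep ns).Nodup := by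
  induction M with
  | nil => intro ns h; exact h
  | cons t M ih =>
    intro ns h
    rw [List.foldl_cons]
    apply ih
    by_cases hc : t.2.2 ∈ ns
    · rw [show pvNStep ns t = ns from pvAddName_mem ns t.2.2 hc]; exact h
    · rw [show pvNStep ns t = ns ++ [t.2.2] from pvAddName_not_mem ns t.2.2 hc]
      refine h.append (List.nodup_singleton _) ?_
      intro a ha hb
      rw [List.mem_singleton] at hb
      exact hc (hb ▸ ha)

theorem pvRs_append (M : List (Int × Int × String)) (t : Int × Int × String) (nm : String) :
    pvRs (M ++ [t]) nm = pvRs M nm ++ (if t.2.2 == nm then [t.1] else []) := by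
  cases h : (t.2.2 == nm) <;>
    simp only [pvRs, List.filterMap_append, List.filterMap_cons, List.filterMap_nil, h] <;>
    simp

theorem pvCs_append (M : List (Int × Int × String)) (t : Int × Int × String) (nm : String) :
    pvCs (M ++ [t]) nm = pvCs M nm ++ (if t.2.2 == nm then [t.2.1] else []) := by
  cases h : (t.2.2 == nm) <;>
    simp only [pvCs, List.filterMap_append, List.filterMap_cons, List.filterMap_nil, h] <;>
    simp

theorem pvRs_nil (M : List (Int × Int × String)) (x : String)
    (h : x ∉ M.map (fun t => t.2.2)) : pvRs M x = [] := by
  rw [pvRs, List.filterMap_eq_nil_iff]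
  intro t ht
  have : t.2.2 ≠ x := fun he => h (he ▸ List.mem_map_of_mem ht)
  simp [this]

theorem pvCs_nil (M : List (Int × Int × String)) (x : String)
    (h : x ∉ M.map (fun t => t.2.2)) : pvCs M x = [] := by
  rw [pvCs, List.filterMap_eq_nil_iff]
  intro t ht
  have : t.2.2 ≠ x := fun he => h (he ▸ List.mem_map_of_mem ht)
  simp [this]

theorem pvRs_ne_nil (M : List (Int × Int × String)) (x : String)
    (h : x ∈ M.map (fun t => t.2.2)) : pvRs M x ≠ [] := by
  obtain ⟨t, ht, he⟩ := List.mem_map.mp h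
  have : t.1 ∈ pvRs M x := List.mem_filterMap.mpr ⟨t, ht, by simp [he]⟩
  exact fun hnil => by simp [hnil] at this

theorem pvCs_ne_nil (M : List (Int × Int × String)) (x : String)
    (h : x ∈ M.map (fun t => t.2.2)) : pvCs M x ≠ [] := by
  obtain ⟨t, ht, he⟩ := List.mem_map.mp h
  have : t.2.1 ∈ pvCs M x := List.mem_filterMap.mpr ⟨t, ht, by simp [he]⟩
  exact fun hnil => by simp [hnil] at this

-- MAIN INVARIANT: A's online bounds dict = B's name list paired with gather-then-reduce bounds
theorem pvInvariant (M : List (Int × Int × String)) :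
    (M.foldl pvStep1 PySem.Dict.empty).items
      = (M.foldl pvNStep []).map (fun nm => (nm, pvBnd M nm)) := by
  induction M using List.reverseRecOn with
  | nil => rfl
  | append_singleton M t ih =>
    rw [List.foldl_append, List.foldl_append, List.foldl_cons, List.foldl_nil,
        List.foldl_cons, List.foldl_nil]
    have hnd : (M.foldl pvNStep []).Nodup := pvNodup_foldl_names M [] List.nodup_nil
    have hkeys : (M.foldl pvStep1 PySem.Dict.empty).keys = M.foldl pvNStep [] := by
      simp only [PySem.Dict.keys]
      rw [ih, List.map_map]
      exact List.map_id _
    have hmem : ∀ x, x ∈ M.foldl pvNStep [] ↔ x ∈ M.map (fun t => t.2.2) := fun x => by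
      simpa using pvMem_foldl_names M [] x
    by_cases hin : t.2.2 ∈ M.foldl pvNStep []
    · -- seen name: A modifies the stored bounds, B's name list is unchanged
      have hdc : (M.foldl pvStep1 PySem.Dict.empty).contains t.2.2 = true := by
        simp only [PySem.Dict.contains]
        rw [ih]
        simp only [List.any_eq_true]
        exact ⟨(t.2.2, pvBnd M t.2.2), List.mem_map_of_mem hin, by simp⟩
      have hget : (M.foldl pvStep1 PySem.Dict.empty).getD t.2.2 (0, 0, 0, 0) = pvBnd M t.2.2 :=
        PySem.Dict.getD_of_mem_items _ (by rw [ih]; exact List.mem_map_of_mem hin)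
          (hkeys ▸ hnd) _
      rw [show pvStep1 (M.foldl pvStep1 PySem.Dict.empty) t
          = (M.foldl pvStep1 PySem.Dict.empty).insert t.2.2
              (min ((M.foldl pvStep1 PySem.Dict.empty).getD t.2.2 (0, 0, 0, 0)).1 t.1,
               max ((M.foldl pvStep1 PySem.Dict.empty).getD t.2.2 (0, 0, 0, 0)).2.1 t.1,
               min ((M.foldl pvStep1 PySem.Dict.empty).getD t.2.2 (0, 0, 0, 0)).2.2.1 t.2.1,
               max ((M.foldl pvStep1 PySem.Dict.empty).getD t.2.2 (0, 0, 0, 0)).2.2.2 t.2.1)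
          from pvCellA_contains t.1 _ (t.2.1, t.2.2) hdc]
      rw [hget,
          show pvNStep (M.foldl pvNStep []) t = M.foldl pvNStep []
            from pvAddName_mem _ _ hin,
          PySem.Dict.items_insert_of_contains _ _ hdc, ih, List.map_map]
      apply List.map_congr_left
      intro nm hnm
      simp only [Function.comp_apply]
      by_cases hx : nm = t.2.2
      · subst hx
        rw [if_pos (by simp)]
        have hmm := (hmem t.2.2).mp hnm
        have hne1 : pvRs M t.2.2 ≠ [] := pvRs_ne_nil M t.2.2 hmm
        have hne2 : pvCs M t.2.2 ≠ [] := pvCs_ne_nil M t.2.2 hmm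
        congr 1
        unfold pvBnd
        rw [pvRs_append, pvCs_append]
        simp only [beq_self_eq_true, if_true]
        rw [pvMinD_append _ _ hne1, pvMaxD_append _ _ hne1,
            pvMinD_append _ _ hne2, pvMaxD_append _ _ hne2]
      · rw [if_neg (by simp [hx])]
        have hb : (t.2.2 == nm) = false := by simp [Ne.symm hx]
        congr 1
        unfold pvBnd
        rw [pvRs_append, pvCs_append, hb]
        simp
    · -- fresh name: A inserts the singleton bounds, B appends the name
      have hdc : (M.foldl pvStep1 PySem.Dict.empty).contains t.2.2 = false := by
        simp only [PySem.Dict.contains]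
        rw [ih, Bool.eq_false_iff]
        intro hc
        simp only [List.any_eq_true] at hc
        obtain ⟨p, hp, hpe⟩ := hc
        obtain ⟨nm, hnm, rfl⟩ := List.mem_map.mp hp
        have : nm = t.2.2 := by simpa using hpe
        exact hin (this ▸ hnm)
      have hnotin : t.2.2 ∉ M.map (fun t => t.2.2) := fun hm => hin ((hmem t.2.2).mpr hm)
      rw [show pvStep1 (M.foldl pvStep1 PySem.Dict.empty) t
          = (M.foldl pvStep1 PySem.Dict.empty).insert t.2.2 (t.1, t.1, t.2.1, t.2.1)
          from pvCellA_not_contains t.1 _ (t.2.1, t.2.2) hdc,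
          show pvNStep (M.foldl pvNStep []) t = M.foldl pvNStep [] ++ [t.2.2]
            from pvAddName_not_mem _ _ hin,
          PySem.Dict.items_insert_of_not_contains _ _ hdc, ih, List.map_append]
      congr 1
      · apply List.map_congr_left
        intro nm hnm
        have hx : nm ≠ t.2.2 := fun he => hin (he ▸ hnm)
        have hb : (t.2.2 == nm) = false := by simp [Ne.symm hx]
        congr 1
        unfold pvBnd
        rw [pvRs_append, pvCs_append, hb]
        simp
      · simp only [List.map_cons, List.map_nil]
        have hb : ((t.2.1, t.2.2).2 == t.2.2) = true := by simp
        have h1 : pvRs (M ++ [t]) t.2.2 = [t.1] := by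
          rw [pvRs_append, hb, pvRs_nil M t.2.2 hnotin]
          simp
        have h2 : pvCs (M ++ [t]) t.2.2 = [t.2.1] := by
          rw [pvCs_append, hb, pvCs_nil M t.2.2 hnotin]
          simp
        unfold pvBnd
        rw [h1, h2]
        rfl

-- the two per-name rectangle constructions produce identical item lists
theorem pvRect_items (col_pos col_sizes row_pos row_sizes : List Int) (col_gap row_gap : Int)
    (areas : List (List String)) (nm : String) :
    (pvRectAVal col_pos col_sizes row_pos row_sizes col_gap row_gap
        (nm, pvBnd (pvCellsFrom areas 0) nm)).items
      = (pvRectFor col_pos col_sizes row_pos row_sizes col_gap row_gap areas nm).items := by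
  unfold pvRectAVal pvRectFor pvBnd
  rw [pvRowsOf_eq, pvColsOf_eq]
  dsimp only
  split_ifs <;>
    simp [pvMakeRect, PySem.Dict.ofList, PySem.Dict.update, PySem.Dict.insert,
      PySem.Dict.contains, PySem.Dict.getD, PySem.Dict.get?, PySem.Dict.empty]

-- ===== VERDICT (by name: the statement is the Claim_ definition above) =====
theorem map_areas_py_spec : Claim_equal_map_areas_py := by
  intro areas col_pos col_sizes row_pos row_sizes col_gap row_gap _ _
  unfold Spec_map_areas_py map_areas_py map_areas_py_alt
  have hnd : ((pvCellsFrom areas 0).foldl pvNStep []).Nodup :=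
    pvNodup_foldl_names _ [] List.nodup_nil
  have hNames : pvNames areas = (pvCellsFrom areas 0).foldl pvNStep [] := by
    unfold pvNames; exact pvFlatNames areas 0 []
  have hA1 : (PySem.List.enumerate areas).foldl pvRowA PySem.Dict.empty
      = (pvCellsFrom areas 0).foldl pvStep1 PySem.Dict.empty := pvFlatA areas 0 _
  have hfun : pvRectA col_pos col_sizes row_pos row_sizes col_gap row_gap
      = (fun (d : PySem.Dict String (PySem.Dict String Int)) (a : String × (Int × Int × Int × Int)) =>
          d.insert a.1 (pvRectAVal col_pos col_sizes row_pos row_sizes col_gap row_gap a)) := rfl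
  have hA2 := PySem.Dict.items_foldl_insert_fresh
      (((pvCellsFrom areas 0).foldl pvNStep []).map
        (fun nm => (nm, pvBnd (pvCellsFrom areas 0) nm)))
      (fun nb => nb.1)
      (fun nb => pvRectAVal col_pos col_sizes row_pos row_sizes col_gap row_gap nb)
      PySem.Dict.empty (fun a _ => rfl)
      (by rw [List.map_map]; exact (List.map_id _).symm ▸ hnd)
  have hB2 := PySem.Dict.items_foldl_insert_fresh
      ((pvCellsFrom areas 0).foldl pvNStep [])
      (fun nm => nm)
      (fun nm => pvRectFor col_pos col_sizes row_pos row_sizes col_gap row_gap areas nm)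
      PySem.Dict.empty (fun a _ => rfl) (by simpa using hnd)
  rw [hA1, pvInvariant, hfun, hNames, hA2, hB2]
  simp only [PySem.Dict.empty, List.nil_append, List.map_map]
  apply List.map_congr_left
  intro nm _
  simp only [Function.comp_apply]
  exact congrArg (fun l => (nm, l))
    (pvRect_items col_pos col_sizes row_pos row_sizes col_gap row_gap areas nm)
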